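-- pv_equiv track=rewrite | github.com/AnderGil/TFG_Diccionarios_Inversos | Scripts/Primer prototipo (Mask-Filling)/eval.py | do_eval_function
-- ===== SOURCE A (Python) =====
-- def do_eval_function(precision_1, precision_10, precision_100, median_and_variance, k_words, predictions, golds):
--     for i, gold in enumerate(golds):
--         predictions_i = predictions[i].split(" ")[1:]
--         if gold in predictions_i:
--             index = predictions_i.index(gold)
--             median_and_variance.append(index)
--             if index <= 0:
--                 precision_1 += 1
--             if index <= 9:
--                 precision_10 += 1
--             if index <= 99:
--                 precision_100 += 1
--     return precision_1, precision_10, precision_100, median_and_variance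
-- ===== SOURCE B (Python) =====
-- def do_eval_function(precision_1, precision_10, precision_100, median_and_variance, k_words, predictions, golds):
--     # rank of each found gold via a first-occurrence hash index (no 'in'+'.index' double scan)
--     ranks = []
--     for pred, gold in zip(predictions, golds):
--         first = {}
--         for j, tok in enumerate(pred.split(" ")[1:]):
--             first.setdefault(tok, j)
--         if gold in first:
--             ranks.append(first[gold])
--     median_and_variance.extend(ranks)
--     # cumulative thresholds over the sorted rank multiset (stop once past 99)
--     c1 = c10 = c100 = 0
--     for r in sorted(ranks):
--         if r > 99:
--             break
--         c100 += 1
--         if r <= 9: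
--             c10 += 1
--             if r <= 0:
--                 c1 += 1
--     return precision_1 + c1, precision_10 + c10, precision_100 + c100, median_and_variance
-- ===== Notes on version B (the rewrite author's own statement) =====
-- stated objective: alternative
-- what changed: A scans each candidate list twice ('in' then '.index') and bumps three counters inline per hit; B instead builds a first-occurrence hash index per prediction (setdefault over enumerate) to get the rank in one lookup, and derives the three precision counters by a single cumulative walk over the SORTED rank multiset that stops once past the 99 threshold.
import Mathlib
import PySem

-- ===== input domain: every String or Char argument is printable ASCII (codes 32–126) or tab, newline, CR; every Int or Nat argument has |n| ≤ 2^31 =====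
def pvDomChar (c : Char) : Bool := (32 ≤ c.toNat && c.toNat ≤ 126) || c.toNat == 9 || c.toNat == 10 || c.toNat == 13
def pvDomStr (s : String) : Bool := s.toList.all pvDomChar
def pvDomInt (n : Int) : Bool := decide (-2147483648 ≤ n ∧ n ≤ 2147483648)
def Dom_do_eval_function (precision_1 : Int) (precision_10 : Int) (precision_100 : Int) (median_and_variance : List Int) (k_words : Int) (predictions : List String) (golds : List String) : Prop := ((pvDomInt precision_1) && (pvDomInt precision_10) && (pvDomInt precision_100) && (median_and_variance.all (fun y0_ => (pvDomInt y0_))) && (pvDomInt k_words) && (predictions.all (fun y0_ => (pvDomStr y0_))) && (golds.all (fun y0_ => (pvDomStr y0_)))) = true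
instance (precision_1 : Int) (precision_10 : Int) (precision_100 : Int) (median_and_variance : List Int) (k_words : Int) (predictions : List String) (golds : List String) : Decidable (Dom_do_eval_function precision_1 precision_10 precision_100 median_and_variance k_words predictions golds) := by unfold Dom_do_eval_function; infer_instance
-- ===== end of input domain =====

-- B replaces A's 'in'+'.index' double scan by a first-occurrence hash index per prediction and
-- derives the counters from a cumulative walk over the sorted rank multiset (objective: alternative).
-- The Python A mutates median_and_variance in place; B performs the same mutation via .extend, and the
-- equivalence proved here is about the returned value.

-- predictions[i].split(" ")[1:], an expression both Pythons contain literally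
def candOf (p : String) : List String :=
  PySem.List.slice ((PySem.Str.split? p " ").getD []) (some 1) none

-- ===== PORT A =====
-- the 'for i, gold in enumerate(golds)' loop, carrying the index and the four accumulators
def doEvalLoopA (preds : List String) : List String → Int → Int → Int → Int → List Int → Int × Int × Int × List Int
  | [], _, p1, p10, p100, mv => (p1, p10, p100, mv)
  | g :: gs, i, p1, p10, p100, mv =>
    match PySem.List.pyGet? preds i with
    | none => (p1, p10, p100, mv)   -- IndexError in Python; unreachable under Pre_
    | some pi =>
      match PySem.List.index? (candOf pi) g with
      | some idx =>
          doEvalLoopA preds gs (i + 1)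
            (if (idx : Int) ≤ 0 then p1 + 1 else p1)
            (if (idx : Int) ≤ 9 then p10 + 1 else p10)
            (if (idx : Int) ≤ 99 then p100 + 1 else p100)
            (mv ++ [(idx : Int)])
      | none => doEvalLoopA preds gs (i + 1) p1 p10 p100 mv

def do_eval_function (precision_1 : Int) (precision_10 : Int) (precision_100 : Int) (median_and_variance : List Int) (k_words : Int) (predictions : List String) (golds : List String) : Int × Int × Int × List Int :=
  doEvalLoopA predictions golds 0 precision_1 precision_10 precision_100 median_and_variance

-- ===== PORT B =====
-- the inner 'for j, tok in enumerate(...): first.setdefault(tok, j)' loop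
def firstIndex (toks : List String) : PySem.Dict String Int :=
  (PySem.List.enumerate toks 0).foldl (fun d p => d.setdefault p.2 p.1) PySem.Dict.empty

-- the outer 'for pred, gold in zip(...)' loop building the rank table
def ranksLoop : List (String × String) → List Int → List Int
  | [], acc => acc
  | (pred, gold) :: rest, acc =>
    let first := firstIndex (candOf pred)
    match first.get? gold with
    | some r => ranksLoop rest (acc ++ [r])
    | none => ranksLoop rest acc

-- the 'for r in sorted(ranks): … break' cumulative counting loop
def countLoop : List Int → Int → Int → Int → Int × Int × Int
  | [], c1, c10, c100 => (c1, c10, c100)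
  | r :: rs, c1, c10, c100 =>
    if r > 99 then (c1, c10, c100)
    else countLoop rs
      (if r ≤ 9 then (if r ≤ 0 then c1 + 1 else c1) else c1)
      (if r ≤ 9 then c10 + 1 else c10)
      (c100 + 1)

def do_eval_function_alt (precision_1 : Int) (precision_10 : Int) (precision_100 : Int) (median_and_variance : List Int) (k_words : Int) (predictions : List String) (golds : List String) : Int × Int × Int × List Int :=
  let ranks := ranksLoop (predictions.zip golds) []
  let mv := median_and_variance ++ ranks
  let c := countLoop (PySem.List.sorted ranks (fun x => x) false) 0 0 0
  (precision_1 + c.1, precision_10 + c.2.1, precision_100 + c.2.2, mv)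

-- ===== PRECONDITION & SPEC =====
-- Pre_ excludes exactly the inputs where A raises IndexError (more golds than predictions).
def Pre_do_eval_function (precision_1 : Int) (precision_10 : Int) (precision_100 : Int) (median_and_variance : List Int) (k_words : Int) (predictions : List String) (golds : List String) : Prop :=
  golds.length ≤ predictions.length
instance (precision_1 : Int) (precision_10 : Int) (precision_100 : Int) (median_and_variance : List Int) (k_words : Int) (predictions : List String) (golds : List String) : Decidable (Pre_do_eval_function precision_1 precision_10 precision_100 median_and_variance k_words predictions golds) := by unfold Pre_do_eval_function; infer_instance

def pvWitness_do_eval_function : Int × Int × Int × List Int × Int × List String × List String :=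
  (0, 0, 0, [7], 5, ["w a b", "w c"], ["b", "x"])

def Spec_do_eval_function (precision_1 : Int) (precision_10 : Int) (precision_100 : Int) (median_and_variance : List Int) (k_words : Int) (predictions : List String) (golds : List String) (out : Int × Int × Int × List Int) : Prop := out = do_eval_function_alt precision_1 precision_10 precision_100 median_and_variance k_words predictions golds
instance (precision_1 : Int) (precision_10 : Int) (precision_100 : Int) (median_and_variance : List Int) (k_words : Int) (predictions : List String) (golds : List String) (out : Int × Int × Int × List Int) : Decidable (Spec_do_eval_function precision_1 precision_10 precision_100 median_and_variance k_words predictions golds out) := by unfold Spec_do_eval_function; infer_instance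

-- ===== CLAIM (what is proved, stated in full; the proofs are below) =====
def Claim_equal_do_eval_function : Prop := ∀ (precision_1 : Int) (precision_10 : Int) (precision_100 : Int) (median_and_variance : List Int) (k_words : Int) (predictions : List String) (golds : List String), Dom_do_eval_function precision_1 precision_10 precision_100 median_and_variance k_words predictions golds → Pre_do_eval_function precision_1 precision_10 precision_100 median_and_variance k_words predictions golds → Spec_do_eval_function precision_1 precision_10 precision_100 median_and_variance k_words predictions golds (do_eval_function precision_1 precision_10 precision_100 median_and_variance k_words predictions golds)

-- ===== LEMMAS AND PROOFS =====

-- the rank of one (prediction, gold) pair, the common value of both ports' per-pair computation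
def rankOf (pg : String × String) : Option Int :=
  (PySem.List.index? (candOf pg.1) pg.2).map (fun n : Nat => (n : Int))

-- the first-occurrence dict looks up to the first index: the setdefault fold realises index?
lemma firstIndex_fold_get? (g : String) :
    ∀ (toks : List String) (s : Int) (d : PySem.Dict String Int),
    ((PySem.List.enumerate toks s).foldl (fun d p => d.setdefault p.2 p.1) d).get? g =
      if d.contains g then d.get? g
      else (PySem.List.index? toks g).map (fun n : Nat => s + n) := by
  intro toks
  induction toks with
  | nil =>
    intro s d
    rw [PySem.List.enumerate_nil]
    simp only [List.foldl_nil, PySem.List.index?_eq_idxOf?, List.idxOf?_nil, Option.map_none]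
    split_ifs with h
    · rfl
    · exact (PySem.Dict.get?_eq_none_iff_contains d g).mpr (by simpa using h)
  | cons t ts ih =>
    intro s d
    rw [PySem.List.enumerate_cons]
    simp only [List.foldl_cons]
    rw [ih (s + 1) (d.setdefault t s)]
    by_cases hdg : d.contains g = true
    · have h1 : (d.setdefault t s).contains g = true := by
        by_cases hct : d.contains t = true
        · rw [PySem.Dict.setdefault_of_contains d s hct]; exact hdg
        · rw [PySem.Dict.setdefault_of_not_contains d s (by simpa using hct)]
          rw [PySem.Dict.contains_insert]; simp [hdg]
      rw [if_pos h1, if_pos hdg]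
      by_cases hct : d.contains t = true
      · rw [PySem.Dict.setdefault_of_contains d s hct]
      · rw [PySem.Dict.setdefault_of_not_contains d s (by simpa using hct)]
        have htg : g ≠ t := by rintro rfl; rw [hdg] at hct; exact hct rfl
        exact PySem.Dict.get?_insert_of_ne d s htg
    · rw [if_neg hdg]
      by_cases htg : t = g
      · subst htg
        have hd' : d.setdefault t s = d.insert t s :=
          PySem.Dict.setdefault_of_not_contains d s (by simpa using hdg)
        have h1 : (d.setdefault t s).contains t = true := by
          rw [hd']; exact PySem.Dict.contains_insert_self d t s
        rw [if_pos h1, hd', PySem.Dict.get?_insert_self]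
        rw [PySem.List.index?_cons_self]
        simp
      · have h1 : (d.setdefault t s).contains g = d.contains g := by
          by_cases hct : d.contains t = true
          · rw [PySem.Dict.setdefault_of_contains d s hct]
          · rw [PySem.Dict.setdefault_of_not_contains d s (by simpa using hct)]
            rw [PySem.Dict.contains_insert]
            have hgt : (g == t) = false := by simp [Ne.symm htg]
            rw [hgt]; simp
        rw [h1, if_neg hdg]
        rw [PySem.List.index?_cons_of_ne ts htg]
        cases PySem.List.index? ts g with
        | none => rfl
        | some n => simp only [Option.map_some]; congr 1; push_cast; ring

lemma firstIndex_get? (toks : List String) (g : String) :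
    (firstIndex toks).get? g = (PySem.List.index? toks g).map (fun n : Nat => (n : Int)) := by
  unfold firstIndex
  rw [firstIndex_fold_get? g toks 0 PySem.Dict.empty]
  simp [PySem.Dict.contains_empty]

-- the rank-table loop appends exactly the found ranks
lemma ranksLoop_eq (pairs : List (String × String)) :
    ∀ acc : List Int, ranksLoop pairs acc = acc ++ pairs.filterMap rankOf := by
  induction pairs with
  | nil => intro acc; simp [ranksLoop]
  | cons pg rest ih =>
    intro acc
    obtain ⟨pred, gold⟩ := pg
    simp only [ranksLoop, firstIndex_get? (candOf pred) gold, List.filterMap_cons]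
    have hr : rankOf (pred, gold) = (PySem.List.index? (candOf pred) gold).map (fun n : Nat => (n : Int)) := by
      unfold rankOf; rfl
    rw [hr]
    cases PySem.List.index? (candOf pred) gold with
    | none => simp only [Option.map_none]; exact ih acc
    | some n => simp only [Option.map_some]; rw [ih (acc ++ [(n : Int)])]; simp

-- on a ≤-sorted list the early-exit cumulative loop computes the three threshold counts
lemma countLoop_eq (l : List Int) (hs : l.Pairwise (· ≤ ·)) :
    ∀ c1 c10 c100 : Int, countLoop l c1 c10 c100 =
      (c1 + (l.countP (fun r => r ≤ 0) : Int),
       c10 + (l.countP (fun r => r ≤ 9) : Int),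
       c100 + (l.countP (fun r => r ≤ 99) : Int)) := by
  induction l with
  | nil => intro c1 c10 c100; simp [countLoop]
  | cons r rs ih =>
    intro c1 c10 c100
    rcases List.pairwise_cons.mp hs with ⟨hall, hrs⟩
    by_cases h99 : r > 99
    · simp only [countLoop, if_pos h99]
      have hz0 : (r :: rs).countP (fun x => x ≤ 0) = 0 :=
        List.countP_eq_zero.mpr (by
          intro x hx
          rcases List.mem_cons.mp hx with rfl | hx
          · simp; omega
          · have := hall x hx; simp; omega)
      have hz9 : (r :: rs).countP (fun x => x ≤ 9) = 0 :=
        List.countP_eq_zero.mpr (by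
          intro x hx
          rcases List.mem_cons.mp hx with rfl | hx
          · simp; omega
          · have := hall x hx; simp; omega)
      have hz99 : (r :: rs).countP (fun x => x ≤ 99) = 0 :=
        List.countP_eq_zero.mpr (by
          intro x hx
          rcases List.mem_cons.mp hx with rfl | hx
          · simp; omega
          · have := hall x hx; simp; omega)
      rw [hz0, hz9, hz99]; simp
    · simp only [countLoop, if_neg h99]
      rw [ih hrs]
      simp only [List.countP_cons]
      refine Prod.ext ?_ (Prod.ext ?_ ?_) <;>
        · simp only [decide_eq_true_eq]
          split_ifs <;> push_cast <;> omega

-- A's interleaved loop computes the same closed form (used to meet B's staged computation)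
lemma doEvalLoopA_eq (preds : List String) :
    ∀ (gs : List String) (i : Nat) (p1 p10 p100 : Int) (mv : List Int),
    i + gs.length ≤ preds.length →
    doEvalLoopA preds gs (i : Int) p1 p10 p100 mv =
      (p1 + ((((preds.drop i).zip gs).filterMap rankOf).countP (fun r => r ≤ 0) : Int),
       p10 + ((((preds.drop i).zip gs).filterMap rankOf).countP (fun r => r ≤ 9) : Int),
       p100 + ((((preds.drop i).zip gs).filterMap rankOf).countP (fun r => r ≤ 99) : Int),
       mv ++ ((preds.drop i).zip gs).filterMap rankOf) := by
  intro gs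
  induction gs with
  | nil => intro i p1 p10 p100 mv h; simp [doEvalLoopA]
  | cons g gs ih =>
    intro i p1 p10 p100 mv h
    simp only [List.length_cons] at h
    have hi : i < preds.length := by omega
    have hget : PySem.List.pyGet? preds (i : Int) = some preds[i] := by
      rw [PySem.List.pyGet?_natCast]
      simp [List.getElem?_eq_getElem hi]
    have hdrop : preds.drop i = preds[i] :: preds.drop (i + 1) :=
      List.drop_eq_getElem_cons hi
    have hih := fun p1' p10' p100' mv' => ih (i + 1) p1' p10' p100' mv' (by omega)
    have hcast : ((i : Int) + 1) = ((i + 1 : Nat) : Int) := by push_cast; ring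
    simp only [doEvalLoopA, hget, hdrop, List.zip_cons_cons, List.filterMap_cons]
    cases hidx : PySem.List.index? (candOf preds[i]) g with
    | none =>
      have hr : rankOf (preds[i], g) = none := by unfold rankOf; rw [hidx]; rfl
      simp only [hr]
      rw [hcast, hih]
    | some idx =>
      have hr : rankOf (preds[i], g) = some (idx : Int) := by unfold rankOf; rw [hidx]; rfl
      simp only [hr]
      rw [hcast, hih]
      simp only [List.countP_cons, List.append_assoc, List.singleton_append]
      refine Prod.ext ?_ (Prod.ext ?_ (Prod.ext ?_ rfl)) <;>
        · simp only [decide_eq_true_eq]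
          split_ifs <;> push_cast <;> omega

-- ===== VERDICT (by name: the statement is the Claim_ definition above) =====
theorem do_eval_function_spec : Claim_equal_do_eval_function := by
  intro p1 p10 p100 mv k preds golds _ hpre
  unfold Spec_do_eval_function do_eval_function do_eval_function_alt
  rw [ranksLoop_eq (preds.zip golds) []]
  simp only [List.nil_append]
  set R := (preds.zip golds).filterMap rankOf with hR
  rw [countLoop_eq (PySem.List.sorted R (fun x => x) false)
        (by simpa using PySem.List.sorted_pairwise R (fun x => x))]
  have hperm := PySem.List.sorted_perm R (fun x => x) false
  rw [hperm.countP_eq, hperm.countP_eq, hperm.countP_eq]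
  have := doEvalLoopA_eq preds golds 0 p1 p10 p100 mv (by simpa using hpre)
  simpa [hR] using this
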